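-- pv_equiv track=rewrite | github.com/garcia-onate/stuff | pysim-main/pysim/runPostRun.py | parse_train_config
-- ===== SOURCE A (Python) =====
-- def parse_train_config(total_cars, loco_positions):
--     """
--     Parse train configuration from locomotive positions.
--
--     Args:
--         total_cars: Total number of cars in the train (freight cars only, excluding locomotives)
--         loco_positions: List of locomotive positions (positions within total train length including locomotives)
--
--     Returns:
--         tuple: (train_type, cars_after_last_loco, num_consist)
--     """
--     if not loco_positions:
--         return "invalid", 0, 0  # Return 0 for num_consist
--
--     loco_positions = sorted(loco_positions)
--
--     # Calculate total train length (cars + locomotives)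
--     total_train_length = total_cars + len(loco_positions)
--
--     # Validate that all locomotive positions are within the total train length
--     if any(pos > total_train_length for pos in loco_positions):
--         return "invalid", 0, 0
--
--     consists = []
--     current_consist = [loco_positions[0]]
--
--     # Identify consists (consecutive locomotive positions)
--     for i in range(1, len(loco_positions)):
--         if loco_positions[i] == loco_positions[i - 1] + 1:
--             current_consist.append(loco_positions[i])
--         else:
--             consists.append(current_consist)
--             current_consist = [loco_positions[i]]
--     consists.append(current_consist)
--
--     # Calculate number of consists
--     num_consist = len(consists)
--
--     # Determine train type
--     has_lead = any(1 in consist for consist in consists)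
--     remote_consists = [c for c in consists if 1 not in c]
--
--     # Calculate cars after the last locomotive
--     last_loco_position = loco_positions[-1]
--     cars_after_last_loco = total_train_length - last_loco_position
--
--     if cars_after_last_loco < 0:
--         return "invalid", 0, num_consist
--
--     if has_lead and not remote_consists:
--         return "conventional", cars_after_last_loco, num_consist
--     elif remote_consists:
--         if cars_after_last_loco == 0:
--             return "end-dp", 0, num_consist
--         else:
--             return "mid-dp", cars_after_last_loco, num_consist
--     else:
--         return "invalid", 0, num_consist
-- ===== SOURCE B (Python) =====
-- def parse_train_config(total_cars, loco_positions):
--     """Single pass over the sorted positions keeping scalar counters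
--     (run count, remote-run count, does-current-run-contain-1) instead of
--     building the list of consists."""
--     if not loco_positions:
--         return "invalid", 0, 0
--     locs = sorted(loco_positions)
--     total_len = total_cars + len(locs)
--     if locs[-1] > total_len:
--         return "invalid", 0, 0
--     num_consist = 1
--     remote_count = 0
--     cur_has_one = (locs[0] == 1)
--     for prev, cur in zip(locs, locs[1:]):
--         if cur != prev + 1:
--             if not cur_has_one:
--                 remote_count += 1
--             num_consist += 1
--             cur_has_one = (cur == 1)
--         elif cur == 1:
--             cur_has_one = True
--     if not cur_has_one:
--         remote_count += 1
--     cars_after = total_len - locs[-1]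
--     if remote_count == 0:
--         return "conventional", cars_after, num_consist
--     elif cars_after == 0:
--         return "end-dp", 0, num_consist
--     else:
--         return "mid-dp", cars_after, num_consist
-- ===== Notes on version B (the rewrite author's own statement) =====
-- stated objective: simpler
-- what changed: Replaces the construction of the explicit list of consists (list of lists) plus the filter/any passes over it by one fold over adjacent pairs of the sorted positions maintaining three scalars (run count, remote-run count, current-run-contains-1), and checks position validity via the last (maximal) element instead of scanning all; the unreachable cars_after<0 and no-lead-no-remote branches are dropped.
import Mathlib
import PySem

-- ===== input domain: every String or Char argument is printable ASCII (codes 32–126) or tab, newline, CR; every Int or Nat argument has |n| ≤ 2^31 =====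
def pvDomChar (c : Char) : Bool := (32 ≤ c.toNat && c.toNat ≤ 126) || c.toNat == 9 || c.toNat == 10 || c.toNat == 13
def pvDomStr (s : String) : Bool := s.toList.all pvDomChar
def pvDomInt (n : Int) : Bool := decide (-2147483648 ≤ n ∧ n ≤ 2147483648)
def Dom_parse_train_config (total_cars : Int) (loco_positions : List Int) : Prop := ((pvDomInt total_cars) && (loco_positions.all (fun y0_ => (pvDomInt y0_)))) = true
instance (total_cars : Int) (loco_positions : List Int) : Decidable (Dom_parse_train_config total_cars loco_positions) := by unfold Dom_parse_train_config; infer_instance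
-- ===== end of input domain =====

-- B replaces A's explicit list-of-consists construction (and the filter/any passes over it)
-- by one scalar-counter fold over adjacent pairs of the sorted positions; same return value.

-- ===== PORT A =====
-- A's consist-building loop: state (consists, current_consist), prev = previous position.
def pvAConsists : List Int → Int → List Int → List (List Int) → List (List Int)
  | [], _, cur, cons => cons ++ [cur]
  | x :: rest, prev, cur, cons =>
      if x = prev + 1 then pvAConsists rest x (cur ++ [x]) cons
      else pvAConsists rest x [x] (cons ++ [cur])

-- body of A for a nonempty sorted position list p0 :: rest
def pvAMain (total_cars p0 : Int) (rest : List Int) : String × Int × Int :=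
  let lp := p0 :: rest
  let total_train_length := total_cars + (lp.length : Int)
  if lp.any (fun pos => pos > total_train_length) then ("invalid", 0, 0)
  else
    let consists := pvAConsists rest p0 [p0] []
    let num_consist : Int := consists.length
    let has_lead := consists.any (fun c => decide ((1:Int) ∈ c))
    let remote_consists := consists.filter (fun c => decide (¬ (1:Int) ∈ c))
    let last_loco_position := lp.getLast (by simp [lp])
    let cars_after_last_loco := total_train_length - last_loco_position
    if cars_after_last_loco < 0 then ("invalid", 0, num_consist)
    else if has_lead ∧ remote_consists = [] then ("conventional", cars_after_last_loco, num_consist)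
    else if remote_consists ≠ [] then
      if cars_after_last_loco = 0 then ("end-dp", 0, num_consist)
      else ("mid-dp", cars_after_last_loco, num_consist)
    else ("invalid", 0, num_consist)

def parse_train_config (total_cars : Int) (loco_positions : List Int) : String × Int × Int :=
  match PySem.List.sorted loco_positions (fun x => x) false with
  | [] => ("invalid", 0, 0)   -- `if not loco_positions` (sorted is [] iff input is [])
  | p0 :: rest => pvAMain total_cars p0 rest

-- ===== PORT B =====
-- B's loop over zip(locs, locs[1:]): scalars (num_consist, remote_count, cur_has_one).
def pvBLoop : List (Int × Int) → Int → Int → Bool → Int × Int × Bool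
  | [], num, rem, cur => (num, rem, cur)
  | (prev, x) :: rest, num, rem, cur =>
      if x ≠ prev + 1 then pvBLoop rest (num + 1) (if cur then rem else rem + 1) (x = 1)
      else pvBLoop rest num rem (cur || x = 1)

-- body of B for a nonempty sorted position list p0 :: rest
def pvBMain (total_cars p0 : Int) (rest : List Int) : String × Int × Int :=
  let locs := p0 :: rest
  let total_len := total_cars + (locs.length : Int)
  let last := locs.getLast (by simp [locs])
  if last > total_len then ("invalid", 0, 0)
  else
    let st := pvBLoop (locs.zip rest) 1 0 (p0 = 1)
    let num_consist := st.1
    let remote_count := if st.2.2 then st.2.1 else st.2.1 + 1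
    let cars_after := total_len - last
    if remote_count = 0 then ("conventional", cars_after, num_consist)
    else if cars_after = 0 then ("end-dp", 0, num_consist)
    else ("mid-dp", cars_after, num_consist)

def parse_train_config_alt (total_cars : Int) (loco_positions : List Int) : String × Int × Int :=
  match PySem.List.sorted loco_positions (fun x => x) false with
  | [] => ("invalid", 0, 0)
  | p0 :: rest => pvBMain total_cars p0 rest

-- ===== PRECONDITION & SPEC =====
def Spec_parse_train_config (total_cars : Int) (loco_positions : List Int) (out : String × Int × Int) : Prop := out = parse_train_config_alt total_cars loco_positions
instance (total_cars : Int) (loco_positions : List Int) (out : String × Int × Int) : Decidable (Spec_parse_train_config total_cars loco_positions out) := by unfold Spec_parse_train_config; infer_instance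

-- ===== CLAIM (what is proved, stated in full; the proofs are below) =====
def Claim_equal_parse_train_config : Prop := ∀ (total_cars : Int) (loco_positions : List Int), Dom_parse_train_config total_cars loco_positions → Spec_parse_train_config total_cars loco_positions (parse_train_config total_cars loco_positions)

-- ===== LEMMAS AND PROOFS =====

-- number of runs not containing 1
def pvRCount (L : List (List Int)) : Int :=
  ((L.filter (fun c => decide (¬ (1:Int) ∈ c))).length : Int)

theorem pvRCount_append (L : List (List Int)) (c : List Int) :
    pvRCount (L ++ [c]) = pvRCount L + (if (1:Int) ∈ c then 0 else 1) := by
  simp [pvRCount, List.filter_append]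
  split_ifs with h <;> simp [h]

theorem pvAConsists_shape : ∀ (ps : List Int) (prev : Int) (cur : List Int) (cons : List (List Int)),
    ∃ L c, pvAConsists ps prev cur cons = L ++ [c] := by
  intro ps
  induction ps with
  | nil => intro prev cur cons; exact ⟨cons, cur, rfl⟩
  | cons x r ih =>
    intro prev cur cons
    simp only [pvAConsists]
    split <;> exact ih _ _ _

theorem pvBLoop_rel : ∀ (ps : List Int) (prev : Int) (cur : List Int) (cons : List (List Int))
    (L : List (List Int)) (c : List Int), pvAConsists ps prev cur cons = L ++ [c] →
    pvBLoop ((prev :: ps).zip ps) ((cons.length : Int) + 1) (pvRCount cons) (decide ((1:Int) ∈ cur)) =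
      ((L.length : Int) + 1, pvRCount L, decide ((1:Int) ∈ c)) := by
  intro ps
  induction ps with
  | nil =>
    intro prev cur cons L c hC
    simp only [pvAConsists] at hC
    obtain ⟨h1, h2⟩ := List.append_inj' hC rfl
    simp only [List.cons_eq_cons] at h2
    subst h1
    simp [pvBLoop, h2.1]
  | cons x r ih =>
    intro prev cur cons L c hC
    simp only [pvAConsists] at hC
    simp only [List.zip_cons_cons, pvBLoop]
    by_cases hx : x = prev + 1
    · subst hx
      rw [if_pos rfl] at hC
      have hf : (decide ((1:Int) ∈ cur) || decide (prev + 1 = 1)) =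
          decide ((1:Int) ∈ cur ++ [prev + 1]) := by
        simp [List.mem_append, eq_comm]
      rw [if_neg (by simp), hf]
      exact ih (prev + 1) (cur ++ [prev + 1]) cons L c hC
    · simp only [if_neg hx] at hC
      rw [if_pos (by simpa using hx)]
      have hf : decide (x = 1) = decide ((1:Int) ∈ [x]) := by simp [eq_comm]
      have hn : ((cons.length : Int) + 1) + 1 = ((cons ++ [cur]).length : Int) + 1 := by
        simp
      have hr : (if decide ((1:Int) ∈ cur) then pvRCount cons else pvRCount cons + 1) =
          pvRCount (cons ++ [cur]) := by
        rw [pvRCount_append]; split_ifs with h1 h2 <;> simp_all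
      rw [hf, hn, hr]
      exact ih x [x] (cons ++ [cur]) L c hC

-- in a ≤-pairwise (sorted) list every element is at most the last one
theorem pvLe_getLast : ∀ (l : List Int) (hne : l ≠ []), l.Pairwise (· ≤ ·) →
    ∀ x ∈ l, x ≤ l.getLast hne := by
  intro l
  induction l with
  | nil => intro h; exact absurd rfl h
  | cons a t ih =>
    intro _ hp x hx
    cases t with
    | nil => simp at hx; simp [hx, List.getLast]
    | cons b r =>
      rw [List.getLast_cons (by simp)]
      rcases List.mem_cons.mp hx with h | h
      · subst h
        calc x ≤ b := (List.pairwise_cons.mp hp).1 b (by simp)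
          _ ≤ (b :: r).getLast (by simp) :=
            ih (by simp) (List.pairwise_cons.mp hp).2 b (by simp)
      · exact ih (by simp) (List.pairwise_cons.mp hp).2 x h

theorem pvMain_eq (tc p0 : Int) (rest : List Int) (hp : (p0 :: rest).Pairwise (· ≤ ·)) :
    pvAMain tc p0 rest = pvBMain tc p0 rest := by
  obtain ⟨L, c, hC⟩ := pvAConsists_shape rest p0 [p0] []
  have hrel := pvBLoop_rel rest p0 [p0] [] L c hC
  have hrel' : pvBLoop ((p0 :: rest).zip rest) 1 0 (decide (p0 = 1)) =
      ((L.length : Int) + 1, pvRCount L, decide ((1:Int) ∈ c)) := by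
    rw [← hrel]
    norm_num [pvRCount]
    congr 1
    simp [eq_comm]
  unfold pvAMain pvBMain
  simp only [hC, hrel']
  have hmax : ∀ x ∈ (p0 :: rest), x ≤ (p0 :: rest).getLast (by simp) :=
    pvLe_getLast _ (by simp) hp
  have hnonneg : 0 ≤ pvRCount L := by simp [pvRCount]
  by_cases hb : (p0 :: rest).getLast (by simp) > tc + ((p0 :: rest).length : Int)
  · have hany : (p0 :: rest).any
        (fun pos => decide (pos > tc + ((p0 :: rest).length : Int))) = true := by
      simp only [List.any_eq_true]
      exact ⟨_, List.getLast_mem (by simp), by simpa using hb⟩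
    rw [if_pos hany, if_pos hb]
  · have hany : ¬ ((p0 :: rest).any
        (fun pos => decide (pos > tc + ((p0 :: rest).length : Int))) = true) := by
      intro hco
      simp only [List.any_eq_true, decide_eq_true_eq] at hco
      obtain ⟨x, hx, hgt⟩ := hco
      exact absurd (lt_of_lt_of_le hgt (hmax x hx)) hb
    rw [if_neg hany, if_neg hb]
    have hcars : ¬ (tc + ((p0 :: rest).length : Int) - (p0 :: rest).getLast (by simp) < 0) := by
      have := not_lt.mp hb; omega
    rw [if_neg hcars]
    by_cases hc : (1:Int) ∈ c
    · by_cases hL : pvRCount L = 0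
      · -- all consists contain 1: both sides return "conventional"
        have hfL : L.filter (fun c => decide (¬ (1:Int) ∈ c)) = [] := by
          have : (L.filter (fun c => decide (¬ (1:Int) ∈ c))).length = 0 := by
            simp only [pvRCount] at hL; exact_mod_cast hL
          exact List.length_eq_zero_iff.mp this
        have hrem : (L ++ [c]).filter (fun c => decide (¬ (1:Int) ∈ c)) = [] := by
          rw [List.filter_append, hfL]
          simp [hc]
        have hlead : ((L ++ [c]).any (fun c => decide ((1:Int) ∈ c))) = true := by
          simp [List.any_append, hc]
        rw [if_pos ⟨hlead, hrem⟩]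
        have hcd : decide ((1:Int) ∈ c) = true := by simpa using hc
        simp [hcd, hL]
      · have hrem : (L ++ [c]).filter (fun c => decide (¬ (1:Int) ∈ c)) ≠ [] := by
          simp only [List.filter_append, ne_eq]
          intro hcon
          have := congrArg List.length hcon
          simp only [List.length_append, List.length_nil, Nat.add_eq_zero_iff] at this
          apply hL
          unfold pvRCount
          rw [List.length_eq_zero_iff.mp this.1]
          norm_num
        rw [if_neg (fun hcon => hrem hcon.2), if_pos hrem]
        have hcd : decide ((1:Int) ∈ c) = true := by simpa using hc
        simp only [hcd, if_true]
        rw [if_neg hL]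
        split_ifs <;> simp
    · have hrem : (L ++ [c]).filter (fun c => decide (¬ (1:Int) ∈ c)) ≠ [] := by
        rw [List.filter_append]
        simp [hc]
      rw [if_neg (fun hcon => hrem hcon.2), if_pos hrem]
      have hcd : decide ((1:Int) ∈ c) = false := by simpa using hc
      simp only [hcd, Bool.false_eq_true, if_false]
      rw [if_neg (by omega : ¬ pvRCount L + 1 = 0)]
      split_ifs <;> simp

-- ===== VERDICT =====
theorem parse_train_config_spec : Claim_equal_parse_train_config := by
  intro tc lp _
  unfold Spec_parse_train_config parse_train_config parse_train_config_alt
  have hp := PySem.List.sorted_pairwise (xs := lp) (key := fun x => x)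
  cases h : PySem.List.sorted lp (fun x => x) false with
  | nil => rfl
  | cons p0 rest =>
    rw [h] at hp
    exact pvMain_eq tc p0 rest hp
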